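-- pv_equiv track=rewrite | github.com/th-snu/Baker-Bird-LZ78 | Baker-Bird/BakerBird.py | aho_corasick
-- ===== SOURCE A (Python) =====
-- def char_to_idx(char):
--     if ord('a') <= ord(char) <= ord('z'):
--         return ord(char) - ord('a')
--     elif ord('A') <= ord(char) <= ord('Z'):
--         return ord(char) - ord('A') + 26
--     else: return ord(char) - ord('0') + 52
--
-- def aho_corasick(row, failure_f, transition_f, output_f):
--     s = 0
--     i = 0
--     r = [[] for _ in range(len(row))]
--
--     while i < len(row):
--         match = transition_f[s][char_to_idx(row[i])]
--         if match != 0: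
--             s = match
--             r[i] = output_f[s]
--             i += 1
--         else:
--             if s == 0:
--                 i += 1
--             else:
--                 s = failure_f[s]
--
--     return r
-- ===== SOURCE B (Python) =====
-- def char_to_idx(char):
--     if ord('a') <= ord(char) <= ord('z'):
--         return ord(char) - ord('a')
--     elif ord('A') <= ord(char) <= ord('Z'):
--         return ord(char) - ord('A') + 26
--     else: return ord(char) - ord('0') + 52
--
-- def aho_corasick(row, failure_f, transition_f, output_f):
--     # Stage 1: compile the automaton into a full DFA over the characters that
--     # actually occur in row, resolving every failure link once per (state, char)
--     # by dynamic programming over the states (failure links point to lower states).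
--     alpha = list(dict.fromkeys(char_to_idx(ch) for ch in row))
--     delta = []
--     for s in range(len(transition_f)):
--         ds = {}
--         for c in alpha:
--             t = transition_f[s][c]
--             ds[c] = t if t != 0 else (0 if s == 0 else delta[failure_f[s]][c])
--         delta.append(ds)
--     # Stage 2: a single linear scan with no failure-following at all.
--     r = []
--     s = 0
--     for ch in row:
--         s = delta[s][char_to_idx(ch)]
--         r.append(output_f[s] if s != 0 else [])
--     return r
-- ===== Notes on version B (the rewrite author's own statement) =====
-- stated objective: alternative
-- what changed: Instead of A's flat while-loop that chases failure links lazily during the scan, B first compiles the automaton into a full DFA over the characters occurring in the row (resolving each failure link once per (state, char) by dynamic programming over the states) and then scans the row in a single pass with no failure-following at all.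
-- outside the precondition, e.g. on aho_corasick('a', [0, 0], [[0, 0], [5, 0]], [[], []]): A returns [[]], B returns [[]]; on aho_corasick('a', [0, 5], [[1, 0], [0, 0]], [[], [1]]): A returns [[1]], B raises IndexError
import Mathlib
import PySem

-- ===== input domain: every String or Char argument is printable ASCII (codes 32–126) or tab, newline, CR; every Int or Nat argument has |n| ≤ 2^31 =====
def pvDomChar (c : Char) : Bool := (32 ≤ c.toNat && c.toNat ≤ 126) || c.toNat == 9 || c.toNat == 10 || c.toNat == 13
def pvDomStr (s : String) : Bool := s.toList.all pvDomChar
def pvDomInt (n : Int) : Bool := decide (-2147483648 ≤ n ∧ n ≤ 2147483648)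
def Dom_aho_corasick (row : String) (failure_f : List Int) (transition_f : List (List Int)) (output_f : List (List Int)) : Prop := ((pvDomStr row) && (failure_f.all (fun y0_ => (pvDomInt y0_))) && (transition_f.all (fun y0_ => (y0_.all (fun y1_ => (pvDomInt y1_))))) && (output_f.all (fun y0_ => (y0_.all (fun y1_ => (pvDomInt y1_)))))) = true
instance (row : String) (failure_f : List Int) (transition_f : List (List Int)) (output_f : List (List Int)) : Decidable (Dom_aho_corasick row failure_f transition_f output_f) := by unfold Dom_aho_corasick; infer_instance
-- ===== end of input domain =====

-- B replaces A's flat while-loop (which chases failure links lazily during the scan) by two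
-- staged passes: it first compiles the automaton into a full DFA over the characters occurring
-- in the row — resolving each failure link once per (state, char) by dynamic programming over
-- the states — and then scans the row in a single pass with no failure-following at all.
-- Equivalence is claimed on Pre_: well-formed automaton tables, outside which A raises or diverges.

-- shared helper: Python char_to_idx (used by both ports and by Pre_)
def charIdx (c : Char) : Int :=
  if 97 ≤ c.toNat ∧ c.toNat ≤ 122 then (c.toNat : Int) - 97
  else if 65 ≤ c.toNat ∧ c.toNat ≤ 90 then (c.toNat : Int) - 65 + 26
  else (c.toNat : Int) - 48 + 52

-- ===== PORT A =====
-- A's single while-loop over (s, i), preallocated r, fuel bounds the loop (A can diverge on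
-- ill-formed failure tables; under Pre_ the fuel is never exhausted).  `none` lookups are where
-- Python raises IndexError (outside Pre_): the port just stops with the current r there.
def loopA (failure_f : List Int) (transition_f : List (List Int)) (output_f : List (List Int))
    (cs : List Char) (fuel : Nat) (s : Int) (i : Nat) (r : List (List Int)) : List (List Int) :=
  match fuel with
  | 0 => r
  | fuel' + 1 =>
    if h : i < cs.length then
      match (PySem.List.pyGet? transition_f s).bind (fun trow => PySem.List.pyGet? trow (charIdx cs[i])) with
      | none => r
      | some m =>
        if m ≠ 0 then
          match PySem.List.pyGet? output_f m with
          | none => r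
          | some out => loopA failure_f transition_f output_f cs fuel' m (i + 1) (r.set i out)
        else if s = 0 then
          loopA failure_f transition_f output_f cs fuel' s (i + 1) r
        else
          match PySem.List.pyGet? failure_f s with
          | none => r
          | some s2 => loopA failure_f transition_f output_f cs fuel' s2 i r
    else r

def aho_corasick (row : String) (failure_f : List Int) (transition_f : List (List Int)) (output_f : List (List Int)) : List (List Int) :=
  loopA failure_f transition_f output_f row.toList
    (row.toList.length * (transition_f.length + 1) + 1) 0 0
    (List.replicate row.toList.length [])

-- ===== PORT B =====
-- Stage 1 helper: one DFA row for state s — `ds = {}` then `for c in alpha: ds[c] = …`,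
-- looking earlier DFA rows up through delta[failure_f[s]][c] (DP over states).
-- `.getD` defaults stand where Python would raise IndexError/KeyError (outside Pre_).
def deltaRow (delta : List (PySem.Dict Int Int)) (failure_f : List Int)
    (transition_f : List (List Int)) (alpha : List Int) (s : Int) : PySem.Dict Int Int :=
  alpha.foldl (fun ds c =>
    let t := ((PySem.List.pyGet? transition_f s).bind (fun trow => PySem.List.pyGet? trow c)).getD 0
    ds.insert c (if t ≠ 0 then t
      else if s = 0 then 0
      else (((PySem.List.pyGet? delta ((PySem.List.pyGet? failure_f s).getD 0)).getD
              PySem.Dict.empty).get? c).getD 0))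
    PySem.Dict.empty

-- Stage 1: `delta = []` then `for s in range(len(transition_f)): delta.append(…)`
def buildDelta (failure_f : List Int) (transition_f : List (List Int)) (alpha : List Int) :
    List (PySem.Dict Int Int) :=
  (PySem.List.pyRange 0 (transition_f.length : Int) 1).foldl
    (fun delta s => delta ++ [deltaRow delta failure_f transition_f alpha s]) []

-- Stage 2: `for ch in row: s = delta[s][char_to_idx(ch)]; r.append(…)`
def scanB (delta : List (PySem.Dict Int Int)) (output_f : List (List Int)) :
    List Char → Int → List (List Int)
  | [], _ => []
  | ch :: rest, s =>
    let s' := (((PySem.List.pyGet? delta s).getD PySem.Dict.empty).get? (charIdx ch)).getD 0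
    (if s' ≠ 0 then (PySem.List.pyGet? output_f s').getD [] else []) :: scanB delta output_f rest s'

-- alpha = list(dict.fromkeys(char_to_idx(ch) for ch in row))
def aho_corasick_alt (row : String) (failure_f : List Int) (transition_f : List (List Int)) (output_f : List (List Int)) : List (List Int) :=
  scanB (buildDelta failure_f transition_f (PySem.Set.ofList (row.toList.map charIdx)))
    output_f row.toList 0

-- ===== PRECONDITION & SPEC =====
-- Pre_ describes a well-formed Aho-Corasick automaton for the given row: every transition row has
-- an in-range entry for every character of the row, entries point to existing states, failure
-- links strictly decrease, and the three tables have equal length.  On ill-formed tables A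
-- raises IndexError or loops forever; Pre_ states well-formedness table-wide, so it also excludes
-- some inputs whose ill-formed entries are never reached by A's run — there A returns while B may
-- return the same value or raise (see the cited examples).  The empty row is always accepted.
def Pre_aho_corasick (row : String) (failure_f : List Int) (transition_f : List (List Int)) (output_f : List (List Int)) : Prop :=
  row.toList = [] ∨
  (1 ≤ transition_f.length ∧
   failure_f.length = transition_f.length ∧
   output_f.length = transition_f.length ∧
   (∀ i : Fin failure_f.length, 1 ≤ i.val → 0 ≤ failure_f[i] ∧ failure_f[i] < (i.val : Int)) ∧
   (transition_f.all (fun trow => row.toList.all (fun ch =>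
      (PySem.List.pyGet? trow (charIdx ch)).any
        (fun t => decide (0 ≤ t ∧ t < (transition_f.length : Int)))))) = true)

instance (row : String) (failure_f : List Int) (transition_f : List (List Int)) (output_f : List (List Int)) : Decidable (Pre_aho_corasick row failure_f transition_f output_f) := by
  unfold Pre_aho_corasick; infer_instance

def pvWitness_aho_corasick : String × List Int × List (List Int) × List (List Int) :=
  ("ab", [0, 0, 0], [[1, 0], [1, 2], [1, 0]], [[], [], [2]])

def Spec_aho_corasick (row : String) (failure_f : List Int) (transition_f : List (List Int)) (output_f : List (List Int)) (out : List (List Int)) : Prop := out = aho_corasick_alt row failure_f transition_f output_f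
instance (row : String) (failure_f : List Int) (transition_f : List (List Int)) (output_f : List (List Int)) (out : List (List Int)) : Decidable (Spec_aho_corasick row failure_f transition_f output_f out) := by unfold Spec_aho_corasick; infer_instance

-- ===== CLAIM (what is proved, stated in full; the proofs are below) =====
def Claim_equal_aho_corasick : Prop := ∀ (row : String) (failure_f : List Int) (transition_f : List (List Int)) (output_f : List (List Int)), Dom_aho_corasick row failure_f transition_f output_f → Pre_aho_corasick row failure_f transition_f output_f → Spec_aho_corasick row failure_f transition_f output_f (aho_corasick row failure_f transition_f output_f)

-- ===== LEMMAS AND PROOFS =====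

-- proof-side name for Python's `transition_f[s][c]` with default 0
def transD (T : List (List Int)) (c s : Int) : Int :=
  ((PySem.List.pyGet? T s).bind (fun trow => PySem.List.pyGet? trow c)).getD 0

-- proof-side model of A's failure-chasing: the inner
-- `while s != 0 and transition_f[s][c] == 0: s = failure_f[s]`
def chaseFail (failure_f : List Int) (transition_f : List (List Int)) (c : Int) (fuel : Nat) (s : Int) : Int :=
  match fuel with
  | 0 => s
  | fuel' + 1 =>
    if s ≠ 0 ∧ ((PySem.List.pyGet? transition_f s).bind (fun trow => PySem.List.pyGet? trow c)).getD 1 = 0 then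
      chaseFail failure_f transition_f c fuel' ((PySem.List.pyGet? failure_f s).getD 0)
    else s

-- proof-side intermediate: the scan written with explicit failure-chasing per position
def loopB (failure_f : List Int) (transition_f : List (List Int)) (output_f : List (List Int)) :
    List Char → Int → List (List Int)
  | [], _ => []
  | ch :: rest, s =>
    let c := charIdx ch
    let s1 := chaseFail failure_f transition_f c transition_f.length s
    let t := ((PySem.List.pyGet? transition_f s1).bind (fun trow => PySem.List.pyGet? trow c)).getD 0
    if t ≠ 0 then
      ((PySem.List.pyGet? output_f t).getD []) :: loopB failure_f transition_f output_f rest t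
    else
      [] :: loopB failure_f transition_f output_f rest s1

-- the DFA value B precomputes: chase failures, then take the transition
def dval (F : List Int) (T : List (List Int)) (c s : Int) : Int :=
  transD T c (chaseFail F T c T.length s)

lemma take_set_succ {α : Type} : ∀ (r : List α) (i : Nat) (v : α), i < r.length →
    (r.set i v).take (i + 1) = r.take i ++ [v] := by
  intro r
  induction r with
  | nil => intro i v h; simp at h
  | cons a rs ih =>
    intro i v h
    cases i with
    | zero => simp
    | succ n =>
      simp only [List.set_cons_succ, List.take_succ_cons, List.cons_append]
      rw [ih n v (by simpa using h)]

lemma take_succ_getElem {α : Type} (r : List α) (i : Nat) (h : i < r.length) :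
    r.take (i + 1) = r.take i ++ [r[i]] := by
  rw [List.take_add_one, List.getElem?_eq_getElem h]
  rfl

-- when the loop condition is false, chaseFail returns s for any fuel
lemma chase_stop (F : List Int) (T : List (List Int)) (c : Int) (fuel : Nat) (s : Int)
    (hc : ¬ (s ≠ 0 ∧ ((PySem.List.pyGet? T s).bind (fun trow => PySem.List.pyGet? trow c)).getD 1 = 0)) :
    chaseFail F T c fuel s = s := by
  cases fuel with
  | zero => rfl
  | succ f => simp only [chaseFail, if_neg hc]

-- chaseFail is fuel-irrelevant once fuel ≥ |s| (failure links strictly decrease)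
lemma chase_irrel (F : List Int) (T : List (List Int)) (c : Int)
    (hF : ∀ i : Fin F.length, 1 ≤ i.val → 0 ≤ F[i] ∧ F[i] < (i.val : Int)) :
    ∀ n (s : Int), s.natAbs = n → 0 ≤ s → s < (F.length : Int) →
      ∀ f1 f2, n ≤ f1 → n ≤ f2 → chaseFail F T c f1 s = chaseFail F T c f2 s := by
  intro n
  induction n using Nat.strong_induction_on with
  | _ n ih =>
    intro s hn hs0 hsN f1 f2 h1 h2
    by_cases hc : s ≠ 0 ∧ ((PySem.List.pyGet? T s).bind (fun trow => PySem.List.pyGet? trow c)).getD 1 = 0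
    · have hs_ne : s ≠ 0 := hc.1
      have hs1 : s.toNat < F.length := by omega
      have hget : PySem.List.pyGet? F s = some (F[s.toNat]'hs1) :=
        PySem.List.pyGet?_eq_some_getElem F hs0 hsN
      have hFs : 0 ≤ F[s.toNat]'hs1 ∧ F[s.toNat]'hs1 < (s.toNat : Int) := by
        have := hF ⟨s.toNat, hs1⟩ (show 1 ≤ s.toNat by omega)
        simpa using this
      obtain ⟨f1', rfl⟩ : ∃ k, f1 = k + 1 := ⟨f1 - 1, by omega⟩
      obtain ⟨f2', rfl⟩ : ∃ k, f2 = k + 1 := ⟨f2 - 1, by omega⟩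
      simp only [chaseFail, if_pos hc, hget, Option.getD_some]
      exact ih (F[s.toNat]'hs1).natAbs (by omega) _ rfl (by omega) (by omega) f1' f2' (by omega) (by omega)
    · rw [chase_stop F T c f1 s hc, chase_stop F T c f2 s hc]

-- the chase ends in range, at a state that is 0 or has a live transition
lemma chase_final (F : List Int) (T : List (List Int)) (c : Int)
    (hFlen : F.length = T.length)
    (hF : ∀ i : Fin F.length, 1 ≤ i.val → 0 ≤ F[i] ∧ F[i] < (i.val : Int))
    (hTc : ∀ trow ∈ T, ∃ t, PySem.List.pyGet? trow c = some t ∧ 0 ≤ t ∧ t < (T.length : Int)) :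
    ∀ n (s : Int), s.natAbs = n → 0 ≤ s → s < (T.length : Int) →
      ∀ fuel, n ≤ fuel →
        (0 ≤ chaseFail F T c fuel s ∧ chaseFail F T c fuel s < (T.length : Int) ∧
         (chaseFail F T c fuel s = 0 ∨ transD T c (chaseFail F T c fuel s) ≠ 0)) := by
  intro n
  induction n using Nat.strong_induction_on with
  | _ n ih =>
    intro s hn hs0 hsN fuel hfuel
    by_cases hc : s ≠ 0 ∧ ((PySem.List.pyGet? T s).bind (fun trow => PySem.List.pyGet? trow c)).getD 1 = 0
    · have hs1 : s.toNat < F.length := by omega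
      have hget : PySem.List.pyGet? F s = some (F[s.toNat]'hs1) :=
        PySem.List.pyGet?_eq_some_getElem F hs0 (by omega)
      have hFs : 0 ≤ F[s.toNat]'hs1 ∧ F[s.toNat]'hs1 < (s.toNat : Int) := by
        have := hF ⟨s.toNat, hs1⟩ (show 1 ≤ s.toNat by omega)
        simpa using this
      obtain ⟨f', rfl⟩ : ∃ k, fuel = k + 1 := ⟨fuel - 1, by omega⟩
      simp only [chaseFail, if_pos hc, hget, Option.getD_some]
      exact ih (F[s.toNat]'hs1).natAbs (by omega) _ rfl (by omega) (by omega) f' (by omega)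
    · rw [chase_stop F T c fuel s hc]
      refine ⟨hs0, hsN, ?_⟩
      by_cases hsz : s = 0
      · exact Or.inl hsz
      · right
        have hsT : s.toNat < T.length := by omega
        have hgT : PySem.List.pyGet? T s = some (T[s.toNat]'hsT) :=
          PySem.List.pyGet?_eq_some_getElem T hs0 hsN
        obtain ⟨t, ht, _, _⟩ := hTc (T[s.toNat]'hsT) (List.getElem_mem hsT)
        simp only [transD, hgT, Option.bind_some, ht, Option.getD_some]
        intro h0
        exact hc ⟨hsz, by simp [hgT, ht, h0]⟩

-- the recurrence the DP computes is the chase-then-transition value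
lemma dval_rec (F : List Int) (T : List (List Int)) (c : Int)
    (hN : 1 ≤ T.length) (hFlen : F.length = T.length)
    (hF : ∀ i : Fin F.length, 1 ≤ i.val → 0 ≤ F[i] ∧ F[i] < (i.val : Int))
    (s : Int) (hs0 : 0 ≤ s) (hsN : s < (T.length : Int))
    (hsome : ∃ t, (PySem.List.pyGet? T s).bind (fun trow => PySem.List.pyGet? trow c) = some t) :
    dval F T c s = if transD T c s ≠ 0 then transD T c s
      else if s = 0 then 0
      else dval F T c ((PySem.List.pyGet? F s).getD 0) := by
  obtain ⟨t, ht⟩ := hsome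
  have htD : transD T c s = t := by simp [transD, ht]
  by_cases h0 : t = 0
  · subst h0
    rw [htD, if_neg (by simp)]
    by_cases hsz : s = 0
    · subst hsz
      rw [if_pos rfl]
      unfold dval
      rw [chase_stop F T c _ 0 (by simp), htD]
    · rw [if_neg hsz]
      have hs1 : s.toNat < F.length := by omega
      have hget : PySem.List.pyGet? F s = some (F[s.toNat]'hs1) :=
        PySem.List.pyGet?_eq_some_getElem F hs0 (by omega)
      have hFs : 0 ≤ F[s.toNat]'hs1 ∧ F[s.toNat]'hs1 < (s.toNat : Int) := by
        have := hF ⟨s.toNat, hs1⟩ (show 1 ≤ s.toNat by omega)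
        simpa using this
      have hcond : s ≠ 0 ∧ ((PySem.List.pyGet? T s).bind (fun trow => PySem.List.pyGet? trow c)).getD 1 = 0 := ⟨hsz, by simp [ht]⟩
      unfold dval
      obtain ⟨N', hN'⟩ : ∃ k, T.length = k + 1 := ⟨T.length - 1, by omega⟩
      rw [hget, Option.getD_some]
      congr 1
      conv_lhs => rw [hN']
      simp only [chaseFail, if_pos hcond, hget, Option.getD_some]
      exact chase_irrel F T c hF (F[s.toNat]'hs1).natAbs _ rfl (by omega) (by omega)
        N' T.length (by omega) (by omega)
  · rw [htD, if_pos h0]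
    unfold dval
    rw [chase_stop F T c _ s (by simp [ht]; intro _; exact fun h => absurd h h0), htD]

-- lookup after a fold of inserts with a key-determined value
lemma get?_foldl_insert_not_mem {κ ν : Type} [BEq κ] [LawfulBEq κ]
    (l : List κ) (v : κ → ν) (d : PySem.Dict κ ν) (c : κ) (hc : c ∉ l) :
    (l.foldl (fun ds c' => ds.insert c' (v c')) d).get? c = d.get? c := by
  induction l generalizing d with
  | nil => rfl
  | cons a t ih =>
    have hne : c ≠ a := fun h => hc (by rw [h]; exact List.mem_cons_self)
    simp only [List.foldl_cons]
    rw [ih _ (fun h => hc (List.mem_cons_of_mem _ h)),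
      PySem.Dict.get?_insert_of_ne _ _ hne]

lemma get?_foldl_insert_mem {κ ν : Type} [BEq κ] [LawfulBEq κ]
    (l : List κ) (v : κ → ν) (d : PySem.Dict κ ν) (c : κ) (hc : c ∈ l) :
    (l.foldl (fun ds c' => ds.insert c' (v c')) d).get? c = some (v c) := by
  induction l generalizing d with
  | nil => simp at hc
  | cons a t ih =>
    simp only [List.foldl_cons]
    by_cases hct : c ∈ t
    · exact ih _ hct
    · have hca : c = a := by rcases List.mem_cons.mp hc with h | h; exact h; exact absurd h hct
      subst hca
      rw [get?_foldl_insert_not_mem t v _ c hct, PySem.Dict.get?_insert_self]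

-- the DP table: length and every entry is the chase-then-transition value
lemma buildDelta_spec (F : List Int) (T : List (List Int)) (alpha : List Int)
    (hN : 1 ≤ T.length) (hFlen : F.length = T.length)
    (hF : ∀ i : Fin F.length, 1 ≤ i.val → 0 ≤ F[i] ∧ F[i] < (i.val : Int))
    (hTc : ∀ c ∈ alpha, ∀ trow ∈ T, ∃ t, PySem.List.pyGet? trow c = some t ∧ 0 ≤ t ∧ t < (T.length : Int)) :
    ∀ k, k ≤ T.length →
      ((PySem.List.pyRange 0 (k : Int) 1).foldl
          (fun delta s => delta ++ [deltaRow delta F T alpha s]) []).length = k ∧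
      (∀ j : Nat, j < k → ∀ c ∈ alpha, ∃ d,
        ((PySem.List.pyRange 0 (k : Int) 1).foldl
            (fun delta s => delta ++ [deltaRow delta F T alpha s]) [])[j]? = some d ∧
        d.get? c = some (dval F T c j)) := by
  intro k
  induction k with
  | zero => intro _; constructor <;> simp
  | succ k ih =>
    intro hk
    obtain ⟨hlen, hprev⟩ := ih (by omega)
    have hsplit : PySem.List.pyRange 0 ((k + 1 : Nat) : Int) 1
        = PySem.List.pyRange 0 (k : Int) 1 ++ [(k : Int)] := by
      push_cast
      exact PySem.List.pyRange_one_succ_right (by positivity)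
    set Dk := (PySem.List.pyRange 0 (k : Int) 1).foldl
      (fun delta s => delta ++ [deltaRow delta F T alpha s]) [] with hDk
    have hfold : (PySem.List.pyRange 0 ((k + 1 : Nat) : Int) 1).foldl
        (fun delta s => delta ++ [deltaRow delta F T alpha s]) []
        = Dk ++ [deltaRow Dk F T alpha (k : Int)] := by
      rw [hsplit, List.foldl_append]
      rfl
    rw [hfold]
    refine ⟨by simp [hlen], ?_⟩
    intro j hj c hc
    by_cases hjk : j < k
    · obtain ⟨d, hd, hdg⟩ := hprev j hjk c hc
      exact ⟨d, by rw [List.getElem?_append_left (by omega)]; exact hd, hdg⟩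
    · have hjk' : j = k := by omega
      subst hjk'
      refine ⟨deltaRow Dk F T alpha (j : Int), ?_, ?_⟩
      · rw [List.getElem?_append_right (by omega)]
        simp [hlen]
      · -- the freshly built row's entry equals dval via the recurrence
        unfold deltaRow
        rw [get?_foldl_insert_mem alpha _ _ c hc]
        congr 1
        have hjT : (j : Int) < (T.length : Int) := by omega
        have hj0 : (0 : Int) ≤ (j : Int) := by positivity
        have hjlt : j < T.length := by omega
        have hgT : PySem.List.pyGet? T (j : Int) = some (T[j]'hjlt) :=
          PySem.List.pyGet?_eq_some_getElem T hj0 hjT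
        obtain ⟨t, ht, ht0, htN⟩ := hTc c hc (T[j]'hjlt) (List.getElem_mem hjlt)
        have hsome : (PySem.List.pyGet? T (j : Int)).bind (fun trow => PySem.List.pyGet? trow c) = some t := by
          simp [hgT, ht]
        have hrec := dval_rec F T c hN hFlen hF (j : Int) hj0 hjT ⟨t, hsome⟩
        have hname : transD T c (j : Int)
            = ((PySem.List.pyGet? T (j : Int)).bind fun trow => PySem.List.pyGet? trow c).getD 0 := rfl
        rw [← hname, hrec]
        by_cases h0 : transD T c (j : Int) ≠ 0
        · rw [if_pos h0, if_pos h0]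
        · rw [if_neg h0, if_neg h0]
          by_cases hjz : (j : Int) = 0
          · rw [if_pos hjz, if_pos hjz]
          · rw [if_neg hjz, if_neg hjz]
            have hj1 : j < F.length := by omega
            have hgF : PySem.List.pyGet? F (j : Int) = some (F[j]'hj1) :=
              PySem.List.pyGet?_eq_some_getElem F hj0 (by omega)
            have hFj : 0 ≤ F[j]'hj1 ∧ F[j]'hj1 < (j : Int) := by
              have := hF ⟨j, hj1⟩ (show 1 ≤ j by omega)
              simpa using this
            have hfk : (F[j]'hj1).toNat < j := by omega
            obtain ⟨d, hd, hdg⟩ := hprev (F[j]'hj1).toNat hfk c hc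
            have hfk' : (F[j]'hj1).toNat < Dk.length := by omega
            have hgD : PySem.List.pyGet? Dk (F[j]'hj1) = some d := by
              rw [PySem.List.pyGet?_eq_some_getElem Dk hFj.1 (by rw [hlen]; omega)]
              rw [List.getElem?_eq_getElem hfk'] at hd
              exact congrArg some (Option.some.inj hd)
            rw [hgF, Option.getD_some, hgD, Option.getD_some, hdg, Option.getD_some]
            congr 1
            omega

-- stage 2 equals the chase-per-position formulation
lemma scan_eq (F : List Int) (T : List (List Int)) (O : List (List Int)) (alpha : List Int)
    (hN : 1 ≤ T.length) (hFlen : F.length = T.length)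
    (hF : ∀ i : Fin F.length, 1 ≤ i.val → 0 ≤ F[i] ∧ F[i] < (i.val : Int))
    (hTc : ∀ c ∈ alpha, ∀ trow ∈ T, ∃ t, PySem.List.pyGet? trow c = some t ∧ 0 ≤ t ∧ t < (T.length : Int)) :
    ∀ (cs : List Char), (∀ ch ∈ cs, charIdx ch ∈ alpha) →
      ∀ s : Int, 0 ≤ s → s < (T.length : Int) →
        scanB (buildDelta F T alpha) O cs s = loopB F T O cs s := by
  have hspec := buildDelta_spec F T alpha hN hFlen hF hTc T.length (le_refl _)
  intro cs
  induction cs with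
  | nil => intro _ s _ _; rfl
  | cons ch rest ih =>
    intro hmem s hs0 hsN
    have hc : charIdx ch ∈ alpha := hmem ch List.mem_cons_self
    obtain ⟨d, hd, hdg⟩ := hspec.2 s.toNat (by omega) (charIdx ch) hc
    have hlenB : (buildDelta F T alpha).length = T.length := hspec.1
    have hgD : PySem.List.pyGet? (buildDelta F T alpha) s = some d := by
      rw [PySem.List.pyGet?_eq_some_getElem _ hs0 (by rw [hlenB]; omega)]
      unfold buildDelta
      rw [List.getElem?_eq_getElem (by rw [hspec.1]; omega)] at hd
      exact congrArg some (Option.some.inj hd)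
    have hcast : ((s.toNat : Nat) : Int) = s := by omega
    -- the looked-up DFA value is dval
    have hval : (((PySem.List.pyGet? (buildDelta F T alpha) s).getD PySem.Dict.empty).get? (charIdx ch)).getD 0
        = dval F T (charIdx ch) s := by
      rw [hgD, Option.getD_some, hdg, Option.getD_some, hcast]
    -- facts about the chase endpoint
    obtain ⟨hs10, hs1N, hs1alt⟩ :=
      chase_final F T (charIdx ch) hFlen hF (hTc _ hc) s.natAbs s rfl hs0 hsN T.length (by omega)
    have hs1T : (chaseFail F T (charIdx ch) T.length s).toNat < T.length := by omega
    have hgT : PySem.List.pyGet? T (chaseFail F T (charIdx ch) T.length s)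
        = some (T[(chaseFail F T (charIdx ch) T.length s).toNat]'hs1T) :=
      PySem.List.pyGet?_eq_some_getElem T hs10 hs1N
    obtain ⟨t, ht, ht0, htN⟩ := hTc (charIdx ch) hc _ (List.getElem_mem hs1T)
    have hloopt : ((PySem.List.pyGet? T (chaseFail F T (charIdx ch) T.length s)).bind
        (fun trow => PySem.List.pyGet? trow (charIdx ch))).getD 0 = t := by
      rw [hgT]; simp [ht]
    have htval : dval F T (charIdx ch) s = t := hloopt
    simp only [scanB, loopB, hval, htval, hloopt]
    by_cases h0 : t = 0
    · subst h0
      rw [if_neg (by simp), if_neg (by simp)]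
      have hs1z : chaseFail F T (charIdx ch) T.length s = 0 := by
        rcases hs1alt with h | h
        · exact h
        · exact absurd htval h
      rw [hs1z, ih (fun x hx => hmem x (List.mem_cons_of_mem _ hx)) 0 (le_refl 0) (by omega)]
    · rw [if_pos h0, if_pos h0,
        ih (fun x hx => hmem x (List.mem_cons_of_mem _ hx)) t ht0 htN]

-- the main loop equivalence: A's flat loop from position i equals the already-produced prefix
-- plus the chase-per-position loop over the remaining characters
lemma main_loop (F : List Int) (T : List (List Int)) (O : List (List Int)) (cs : List Char)
    (hN : 1 ≤ T.length) (hFlen : F.length = T.length) (hOlen : O.length = T.length)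
    (hF : ∀ i : Fin F.length, 1 ≤ i.val → 0 ≤ F[i] ∧ F[i] < (i.val : Int))
    (hT : ∀ trow ∈ T, ∀ ch ∈ cs, ∃ t, PySem.List.pyGet? trow (charIdx ch) = some t ∧
            0 ≤ t ∧ t < (T.length : Int)) :
    ∀ fuel (i : Nat) (s : Int) (r : List (List Int)),
      0 ≤ s → s < (T.length : Int) →
      r.length = cs.length →
      (∀ j (hj : j < r.length), i ≤ j → r[j] = ([] : List Int)) →
      (cs.length - i) * (T.length + 1) + s.natAbs + 1 ≤ fuel →
      loopA F T O cs fuel s i r = r.take i ++ loopB F T O (cs.drop i) s := by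
  intro fuel
  induction fuel with
  | zero => intro i s r _ _ _ _ hfuel; omega
  | succ fuel' ih =>
    intro i s r hs0 hsN hrlen hinv hfuel
    by_cases hi : i < cs.length
    · have hsT : s.toNat < T.length := by omega
      have hgetT : PySem.List.pyGet? T s = some (T[s.toNat]'hsT) :=
        PySem.List.pyGet?_eq_some_getElem T hs0 hsN
      obtain ⟨m, hm, hm0, hmN⟩ := hT (T[s.toNat]'hsT) (List.getElem_mem hsT) cs[i] (List.getElem_mem hi)
      have hstep : (cs.length - i) * (T.length + 1)
          = (cs.length - (i + 1)) * (T.length + 1) + (T.length + 1) := by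
        have h' : cs.length - i = (cs.length - (i + 1)) + 1 := by omega
        rw [h', Nat.add_mul, one_mul]
      have hdrop : cs.drop i = cs[i] :: cs.drop (i + 1) := List.drop_eq_getElem_cons hi
      rw [hdrop]
      simp only [loopA, dif_pos hi, hgetT, Option.bind_some, hm]
      by_cases hmz : m = 0
      · subst hmz
        rw [if_neg (show ¬ (0:Int) ≠ 0 by simp)]
        by_cases hsz : s = 0
        · subst hsz
          rw [if_pos rfl]
          have hchase : chaseFail F T (charIdx cs[i]) T.length 0 = 0 :=
            chase_stop _ _ _ _ _ (by simp)
          simp only [loopB]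
          rw [hchase]
          simp only [hgetT, Option.bind_some, hm, Option.getD_some,
            if_neg (show ¬ (0:Int) ≠ 0 by simp)]
          rw [ih (i + 1) 0 r (le_refl 0) (by exact_mod_cast hN) hrlen
              (fun j hj hij => hinv j hj (by omega)) (by omega)]
          have hri : r[i]'(by omega) = ([] : List Int) := hinv i (by omega) (le_refl i)
          rw [take_succ_getElem r i (by omega), hri, List.append_assoc]
          rfl
        · -- follow one failure link
          have hs1 : s.toNat < F.length := by omega
          have hgetF : PySem.List.pyGet? F s = some (F[s.toNat]'hs1) :=
            PySem.List.pyGet?_eq_some_getElem F hs0 (by omega)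
          have hFs : 0 ≤ F[s.toNat]'hs1 ∧ F[s.toNat]'hs1 < (s.toNat : Int) := by
            have := hF ⟨s.toNat, hs1⟩ (show 1 ≤ s.toNat by omega)
            simpa using this
          rw [if_neg hsz]
          simp only [hgetF]
          have hcond : (s ≠ 0 ∧ ((PySem.List.pyGet? T s).bind (fun trow => PySem.List.pyGet? trow (charIdx cs[i]))).getD 1 = 0) := by
            refine ⟨hsz, ?_⟩; simp [hgetT, hm]
          have hchase : chaseFail F T (charIdx cs[i]) T.length s
              = chaseFail F T (charIdx cs[i]) T.length (F[s.toNat]'hs1) := by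
            obtain ⟨N', hN'⟩ : ∃ k, T.length = k + 1 := ⟨T.length - 1, by omega⟩
            conv_lhs => rw [hN']
            simp only [chaseFail, if_pos hcond, hgetF, Option.getD_some]
            exact chase_irrel F T (charIdx cs[i]) hF (F[s.toNat]'hs1).natAbs _ rfl (by omega)
              (by omega) N' T.length (by omega) (by omega)
          rw [ih i (F[s.toNat]'hs1) r (by omega) (by omega) hrlen hinv (by omega), hdrop]
          simp only [loopB]
          rw [hchase]
      · -- m ≠ 0 : advance with a match
        have hmT : m.toNat < O.length := by omega
        have hgetO : PySem.List.pyGet? O m = some (O[m.toNat]'hmT) :=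
          PySem.List.pyGet?_eq_some_getElem O hm0 (by omega)
        rw [if_pos hmz]
        simp only [hgetO]
        have hchase : chaseFail F T (charIdx cs[i]) T.length s = s :=
          chase_stop _ _ _ _ _ (by simp [hgetT, hm]; intro _; exact fun h => absurd h hmz)
        simp only [loopB]
        rw [hchase]
        simp only [hgetT, Option.bind_some, hm, Option.getD_some, if_pos hmz, hgetO]
        rw [ih (i + 1) m (r.set i (O[m.toNat]'hmT)) hm0 hmN (by simpa using hrlen)
            (fun j hj hij => by
              rw [List.getElem_set_ne (by omega)]
              exact hinv j (by simpa using hj) (by omega)) (by omega)]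
        rw [take_set_succ r i (O[m.toNat]'hmT) (by omega), List.append_assoc]
        rfl
    · have hdrop : cs.drop i = [] := List.drop_eq_nil_of_le (by omega)
      have htake : r.take i = r := List.take_of_length_le (by omega)
      simp only [loopA, dif_neg hi, hdrop, htake, loopB, List.append_nil]

-- ===== VERDICT (by name: the statement is the Claim_ definition above) =====
theorem aho_corasick_spec : Claim_equal_aho_corasick := by
  intro row F T O _hDom hPre
  unfold Spec_aho_corasick aho_corasick aho_corasick_alt
  rcases hPre with hnil | ⟨hN, hFlen, hOlen, hF, hT⟩
  · rw [hnil]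
    rfl
  · have hT' : ∀ trow ∈ T, ∀ ch ∈ row.toList, ∃ t, PySem.List.pyGet? trow (charIdx ch) = some t ∧
        0 ≤ t ∧ t < (T.length : Int) := by
      intro trow htrow ch hch
      have h := (List.all_eq_true.mp ((List.all_eq_true.mp hT) trow htrow)) ch hch
      cases hp : PySem.List.pyGet? trow (charIdx ch) with
      | none => rw [hp] at h; simp at h
      | some t =>
        rw [hp] at h
        exact ⟨t, rfl, by simpa using h⟩
    have hTc : ∀ c ∈ PySem.Set.ofList (row.toList.map charIdx), ∀ trow ∈ T,
        ∃ t, PySem.List.pyGet? trow c = some t ∧ 0 ≤ t ∧ t < (T.length : Int) := by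
      intro c hc trow htrow
      have : c ∈ row.toList.map charIdx := (PySem.Set.mem_ofList _ _).mp hc
      obtain ⟨ch, hch, rfl⟩ := List.mem_map.mp this
      exact hT' trow htrow ch hch
    have hA := main_loop F T O row.toList hN hFlen hOlen hF hT'
      (row.toList.length * (T.length + 1) + 1) 0 0 (List.replicate row.toList.length [])
      (le_refl 0) (by exact_mod_cast hN) (by simp)
      (fun j hj _ => List.getElem_replicate _) (by simp)
    have hB := scan_eq F T O (PySem.Set.ofList (row.toList.map charIdx)) hN hFlen hF hTc
      row.toList (fun ch hch => (PySem.Set.mem_ofList _ _).mpr (List.mem_map_of_mem hch))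
      0 (le_refl 0) (by exact_mod_cast hN)
    rw [hB]
    simpa using hA
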